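-- pv_equiv track=rewrite | github.com/Astony/Homeworks | homework2/task01/text_func/dict_and_text.py | dict_and_text
-- ===== SOURCE A (Python) =====
-- import string
-- from typing import Tuple
--
-- def dict_and_text(text: str) -> Tuple:
--     count_dict = {}
--     for char in text:
--         if (
--             char in string.punctuation
--             or ord(char) in [171, 187, 2014, 2013]
--             or char.isdigit()
--         ):
--             text = text.replace(char, "")
--         elif char not in count_dict.keys():
--             count_dict[char] = 1
--         else:
--             count_dict[char] += 1
--     return count_dict, text
-- ===== SOURCE B (Python) =====
-- import string
--
--
-- def dict_and_text(text):
--     cleaned = "".join(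
--         c for c in text
--         if not (c in string.punctuation or ord(c) in [171, 187, 2014, 2013] or c.isdigit())
--     )
--     count_dict = {c: cleaned.count(c) for c in dict.fromkeys(cleaned)}
--     return count_dict, cleaned
-- ===== Notes on version B (the rewrite author's own statement) =====
-- stated objective: simpler
-- what changed: A's single fused loop that both tallies counts and repeatedly strips bad chars via str.replace is split into build-then-tally: one filtering pass builds the cleaned text, then the count dict is derived from the cleaned text with dict.fromkeys + str.count.
import Mathlib
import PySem

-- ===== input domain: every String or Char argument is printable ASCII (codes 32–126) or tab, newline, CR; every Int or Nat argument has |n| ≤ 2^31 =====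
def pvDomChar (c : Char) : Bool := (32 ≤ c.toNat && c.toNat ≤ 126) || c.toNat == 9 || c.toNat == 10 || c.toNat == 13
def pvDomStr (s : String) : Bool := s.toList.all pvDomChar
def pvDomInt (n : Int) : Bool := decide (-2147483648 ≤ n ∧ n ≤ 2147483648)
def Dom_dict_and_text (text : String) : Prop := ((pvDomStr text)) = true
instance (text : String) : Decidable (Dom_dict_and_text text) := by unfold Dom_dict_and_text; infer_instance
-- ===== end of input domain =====

-- B splits A's fused count-and-strip loop into build-cleaned-text-then-tally-from-it (simpler decomposition); same return value.

-- string.punctuation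
def pvPunct : String := "!\"#$%&'()*+,-./:;<=>?@[\\]^_`{|}~"

-- the bad-char predicate both Pythons share: punctuation, the four special ords, or a digit
def pvIsBad (c : Char) : Bool :=
  PySem.Str.isIn (String.singleton c) pvPunct
    || List.contains [(171 : Int), 187, 2014, 2013] (c.toNat : Int)
    || PySem.Chars.isdigit c

-- ===== PORT A =====
def dict_and_text (text : String) : (List (String × Int)) × String :=
  let step := fun (st : PySem.Dict String Int × String) (c : Char) =>
    if pvIsBad c then
      (st.1, PySem.Str.replace st.2 (String.singleton c) "")
    else if st.1.contains (String.singleton c) = false then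
      (st.1.insert (String.singleton c) 1, st.2)
    else
      (st.1.insert (String.singleton c) (st.1.getD (String.singleton c) 0 + 1), st.2)
  let r := text.toList.foldl step (PySem.Dict.empty, text)
  (r.1.items, r.2)

-- ===== PORT B =====
def dict_and_text_alt (text : String) : (List (String × Int)) × String :=
  let cl := text.toList.filter (fun c => !pvIsBad c)
  let cleaned := String.ofList cl
  ((PySem.List.dedup cl).map
      (fun c => (String.singleton c, (PySem.Str.count cleaned (String.singleton c) : Int))),
    cleaned)

-- ===== PRECONDITION & SPEC =====
def Spec_dict_and_text (text : String) (out : (List (String × Int)) × String) : Prop := out = dict_and_text_alt text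
instance (text : String) (out : (List (String × Int)) × String) : Decidable (Spec_dict_and_text text out) := by unfold Spec_dict_and_text; infer_instance

-- ===== CLAIM (what is proved, stated in full; the proofs are below) =====
def Claim_equal_dict_and_text : Prop := ∀ (text : String), Dom_dict_and_text text → Spec_dict_and_text text (dict_and_text text)

-- ===== LEMMAS AND PROOFS =====

-- s.replace(c, "") for a single char c deletes every occurrence of c
theorem replace_go_single (c : Char) :
    ∀ (fuel : Nat) (l acc : List Char), l.length ≤ fuel →
      PySem.Chars.replace.go [c] [] fuel l acc = acc.reverse ++ l.filter (fun x => !(x == c)) := by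
  intro fuel
  induction fuel with
  | zero =>
    intro l acc h
    have : l = [] := List.eq_nil_of_length_eq_zero (Nat.le_zero.mp h)
    subst this
    simp [PySem.Chars.replace.go]
  | succ n ih =>
    intro l acc h
    cases l with
    | nil => simp [PySem.Chars.replace.go]
    | cons x t =>
      by_cases hx : x = c
      · subst hx
        have hpre : List.isPrefixOf [x] (x :: t) = true := by
          simp [List.isPrefixOf]
        simp only [PySem.Chars.replace.go, hpre, if_true]
        rw [ih]
        · simp
        · simpa using Nat.le_of_succ_le_succ h
      · have hpre : List.isPrefixOf [c] (x :: t) = false := by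
          simp [List.isPrefixOf]
          exact fun h => hx h.symm
        simp only [PySem.Chars.replace.go, hpre]
        rw [ih t (x :: acc) (Nat.le_of_succ_le_succ h)]
        simp [hx]

theorem replace_single (c : Char) (l : List Char) :
    PySem.Chars.replace l [c] [] = l.filter (fun x => !(x == c)) := by
  have := replace_go_single c l.length l [] (le_refl _)
  simpa [PySem.Chars.replace] using this

-- s.count(c) for a single char c is the list count
theorem count_go_single (c : Char) :
    ∀ (fuel : Nat) (l : List Char) (acc : Nat), l.length ≤ fuel →
      PySem.Chars.count.go [c] fuel l acc = acc + l.count c := by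
  intro fuel
  induction fuel with
  | zero =>
    intro l acc h
    have : l = [] := List.eq_nil_of_length_eq_zero (Nat.le_zero.mp h)
    subst this
    simp [PySem.Chars.count.go]
  | succ n ih =>
    intro l acc h
    cases l with
    | nil => simp [PySem.Chars.count.go]
    | cons x t =>
      by_cases hx : x = c
      · subst hx
        have hpre : List.isPrefixOf [x] (x :: t) = true := by simp [List.isPrefixOf]
        simp only [PySem.Chars.count.go, hpre, if_true]
        rw [ih]
        · simp; omega
        · simpa using Nat.le_of_succ_le_succ h
      · have hpre : List.isPrefixOf [c] (x :: t) = false := by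
          simp [List.isPrefixOf]
          exact fun h => hx h.symm
        simp only [PySem.Chars.count.go, hpre]
        rw [ih t acc (Nat.le_of_succ_le_succ h)]
        simp [hx]

theorem count_single (c : Char) (l : List Char) :
    PySem.Chars.count l [c] = l.count c := by
  have := count_go_single c l.length l 0 (le_refl _)
  simpa [PySem.Chars.count] using this

theorem string_singleton_injective : Function.Injective String.singleton := by
  intro a b h
  have := congrArg String.toList h
  simpa using this

-- ofList commutes with an injective map
theorem ofList_map_singleton (l : List Char) :
    PySem.Set.ofList (l.map String.singleton) = (PySem.Set.ofList l).map String.singleton := by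
  induction l with
  | nil => simp [PySem.Set.ofList_nil]
  | cons x t ih =>
    rw [List.map_cons, PySem.Set.ofList_cons, PySem.Set.ofList_cons, ih]
    simp only [PySem.Set.discard, List.filter_map, List.map_cons]
    congr 1
    exact congrArg (List.map String.singleton)
      (List.filter_congr (fun a _ => by simp [Function.comp, string_singleton_injective.eq_iff]))

-- fold with an if-skip is a fold over the filtered list
theorem foldl_if_skip {α β : Type} (p : β → Bool) (f : α → β → α) :
    ∀ (l : List β) (i : α),
      l.foldl (fun a x => if p x then f a x else a) i = (l.filter p).foldl f i := by
  intro l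
  induction l with
  | nil => intro i; simp
  | cons x t ih =>
    intro i
    by_cases hx : p x = true
    · simp [hx, ih]
    · simp at hx
      simp [hx, ih]

-- the pair fold of A splits into two independent folds
theorem foldA_split :
    ∀ (L : List Char) (d : PySem.Dict String Int) (t : String),
      L.foldl (fun (st : PySem.Dict String Int × String) (c : Char) =>
        if pvIsBad c then
          (st.1, PySem.Str.replace st.2 (String.singleton c) "")
        else if st.1.contains (String.singleton c) = false then
          (st.1.insert (String.singleton c) 1, st.2)
        else
          (st.1.insert (String.singleton c) (st.1.getD (String.singleton c) 0 + 1), st.2)) (d, t)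
      = (L.foldl (fun d c =>
            if pvIsBad c then d
            else d.insert (String.singleton c) (d.getD (String.singleton c) 0 + 1)) d,
         L.foldl (fun t c =>
            if pvIsBad c then PySem.Str.replace t (String.singleton c) "" else t) t) := by
  intro L
  induction L with
  | nil => intro d t; simp
  | cons x L ih =>
    intro d t
    by_cases hx : pvIsBad x = true
    · simp only [List.foldl_cons, hx, if_true]
      exact ih d _
    · simp only [Bool.not_eq_true] at hx
      by_cases hc : d.contains (String.singleton x) = false
      · have h1 : d.insert (String.singleton x) 1
            = d.insert (String.singleton x) (d.getD (String.singleton x) 0 + 1) := by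
          rw [PySem.Dict.getD_of_not_contains d (0 : Int) hc]
          norm_num
        simp only [List.foldl_cons, hx, Bool.false_eq_true, if_false, if_pos hc, h1]
        exact ih _ _
      · simp only [List.foldl_cons, hx, Bool.false_eq_true, if_false, if_neg hc]
        exact ih _ _

-- the text fold, at the list level: removing every processed bad char filters the list
theorem textFold_list (L : List Char) :
    ∀ (t : List Char),
      L.foldl (fun t c => if pvIsBad c then t.filter (fun x => !(x == c)) else t) t
      = t.filter (fun x => !(pvIsBad x && L.contains x)) := by
  induction L with
  | nil => intro t; simp
  | cons c L ih =>
    intro t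
    simp only [List.foldl_cons]
    by_cases hc : pvIsBad c = true
    · rw [hc]
      simp only [↓reduceIte]
      rw [ih, List.filter_filter]
      apply List.filter_congr
      intro x _
      by_cases hx : x = c
      · subst hx; simp [hc]
      · simp [hx]
    · simp only [Bool.not_eq_true] at hc
      simp only [hc, Bool.false_eq_true, if_false]
      rw [ih]
      apply List.filter_congr
      intro x _
      by_cases hx : x = c
      · subst hx; simp [hc]
      · simp [hx]

-- the text fold on String, via replace
theorem textFold_string (L : List Char) :
    ∀ (t : String),
      (L.foldl (fun t c => if pvIsBad c then PySem.Str.replace t (String.singleton c) "" else t) t).toList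
      = L.foldl (fun t c => if pvIsBad c then t.filter (fun x => !(x == c)) else t) t.toList := by
  induction L with
  | nil => intro t; simp
  | cons c L ih =>
    intro t
    simp only [List.foldl_cons]
    by_cases hc : pvIsBad c = true
    · simp only [hc, ↓reduceIte]
      rw [ih]
      congr 1
      rw [PySem.Str.toList_replace]
      simp [replace_single]
    · simp only [Bool.not_eq_true] at hc
      simp only [hc, Bool.false_eq_true, if_false]
      exact ih t

-- ===== VERDICT (by name: the statement is the Claim_ definition above) =====
theorem dict_and_text_spec : Claim_equal_dict_and_text := by
  intro text _
  unfold Spec_dict_and_text dict_and_text dict_and_text_alt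
  simp only []
  rw [foldA_split]
  set L := text.toList with hL
  set cl := L.filter (fun c => !pvIsBad c) with hcl
  refine Prod.ext ?_ ?_ <;> simp only []
  · -- dict side
    refine Eq.trans (congrArg PySem.Dict.items
      (?_ : _ = PySem.Dict.counter (cl.map String.singleton))) ?_
    · rw [← PySem.Dict.foldl_insert_getD_add_one_eq_counter, List.foldl_map, hcl,
        ← foldl_if_skip]
      congr 1
      funext d c
      by_cases hc : pvIsBad c = true <;> simp [hc]
    · rw [PySem.Dict.items_counter, ofList_map_singleton, List.map_map,
        ← PySem.List.dedup_eq_ofList]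
      apply List.map_congr_left
      intro c _
      simp only [Function.comp]
      congr 1
      rw [PySem.Str.count_eq]
      have h2 : (String.ofList cl).toList = cl := by simp
      have h3 : (String.singleton c).toList = [c] := by simp
      rw [h2, h3, count_single]
      exact congrArg (Nat.cast : Nat → Int)
        (List.count_map_of_injective cl String.singleton string_singleton_injective c)
  · -- text side
    apply String.ext
    rw [textFold_string, textFold_list]
    have h2 : (String.ofList cl).toList = cl := by simp
    rw [h2, hcl]
    apply List.filter_congr
    intro x hx
    simp
    exact fun h => absurd hx h
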